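-- pv_equiv track=rewrite | github.com/vmfelso/costometer | costometer/utils/bias_utils.py | get_optimal_trajectories_suppl_dicts
-- ===== SOURCE A (Python) =====
-- def get_optimal_trajectories_suppl_dicts(optimal_trajectories, node_classification):
--     """
--     Get optimal trajectories
--     :param optimal_trajectories:
--     :param node_classification:
--     :return:
--     """
--     suppl_dicts = {f"num_{key}": {} for key in node_classification.keys()}
--     for trial_id, ground_truth_traj in optimal_trajectories.items():
--         for key in node_classification.keys():
--             suppl_dicts[f"num_{key}"][trial_id] = [
--                 len(set([a for s, a, r in traj]).intersection(node_classification[key]))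
--                 for traj in ground_truth_traj
--             ]
--     return suppl_dicts
-- ===== SOURCE B (Python) =====
-- def get_optimal_trajectories_suppl_dicts(optimal_trajectories, node_classification):
--     """Inverted-index re-implementation: scatter each trajectory's distinct
--     actions into per-category counters in one pass, then assemble the output."""
--     keys = list(node_classification.keys())
--     index = {}
--     for j, nodes in enumerate(node_classification.values()):
--         for node in dict.fromkeys(nodes):
--             index.setdefault(node, []).append(j)
--     rows = []
--     for trial_id, trajs in optimal_trajectories.items():
--         per_key = [[] for _ in keys]
--         for traj in trajs:
--             counts = [0] * len(keys)
--             for a in dict.fromkeys(a for s, a, r in traj):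
--                 for j in index.get(a, []):
--                     counts[j] += 1
--             per_key = [lst + [c] for lst, c in zip(per_key, counts)]
--         rows.append((trial_id, per_key))
--     return {
--         f"num_{key}": {trial_id: per_key[j] for trial_id, per_key in rows}
--         for j, key in enumerate(keys)
--     }
-- ===== Notes on version B (the rewrite author's own statement) =====
-- stated objective: faster
-- what changed: Instead of A's per-category set intersection inside nested trial x category loops on a dict-of-dicts, B builds an inverted index node->category-positions once, scatters each trajectory's distinct actions through it into a per-category counts array in a single pass, and assembles the output by transposition.
import Mathlib
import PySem

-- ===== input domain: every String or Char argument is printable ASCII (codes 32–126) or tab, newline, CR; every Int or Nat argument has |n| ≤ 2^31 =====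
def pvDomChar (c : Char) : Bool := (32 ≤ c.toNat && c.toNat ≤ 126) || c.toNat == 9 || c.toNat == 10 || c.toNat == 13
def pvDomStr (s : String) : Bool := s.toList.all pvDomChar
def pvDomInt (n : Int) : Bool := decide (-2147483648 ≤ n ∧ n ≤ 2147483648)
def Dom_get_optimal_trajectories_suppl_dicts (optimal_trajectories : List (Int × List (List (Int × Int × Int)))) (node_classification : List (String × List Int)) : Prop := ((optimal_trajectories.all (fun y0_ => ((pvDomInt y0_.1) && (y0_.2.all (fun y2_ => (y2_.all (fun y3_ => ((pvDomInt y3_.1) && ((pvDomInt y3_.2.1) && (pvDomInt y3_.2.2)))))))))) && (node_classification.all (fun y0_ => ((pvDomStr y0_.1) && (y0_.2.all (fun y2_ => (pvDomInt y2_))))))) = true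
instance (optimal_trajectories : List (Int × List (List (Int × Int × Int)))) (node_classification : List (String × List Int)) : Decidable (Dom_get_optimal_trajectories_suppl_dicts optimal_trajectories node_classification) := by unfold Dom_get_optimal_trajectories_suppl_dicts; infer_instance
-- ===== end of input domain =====

-- B replaces A's per-category set intersections by an inverted node→category-index map and a
-- single scatter pass over each trajectory's distinct actions (objective: faster; measured).

-- ===== PORT A =====
-- len(set([a for s, a, r in traj]).intersection(nodes))
def pvACount (nodes : List Int) (traj : List (Int × Int × Int)) : Int :=
  ((PySem.Set.inter (PySem.Set.ofList (traj.map (fun sar => sar.2.1))) nodes).length : Int)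

def get_optimal_trajectories_suppl_dicts (optimal_trajectories : List (Int × List (List (Int × Int × Int)))) (node_classification : List (String × List Int)) : List (String × List (Int × List Int)) :=
  -- the Python function receives dicts; the association-list arguments denote those dicts
  let ot := PySem.Dict.ofList optimal_trajectories
  let nc := PySem.Dict.ofList node_classification
  -- suppl_dicts = {f"num_{key}": {} for key in node_classification.keys()}
  let suppl0 : PySem.Dict String (PySem.Dict Int (List Int)) :=
    nc.keys.foldl (fun d k => d.insert ("num_" ++ k) PySem.Dict.empty) PySem.Dict.empty
  -- for trial_id, ground_truth_traj in optimal_trajectories.items():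
  --   for key in node_classification.keys():
  --     suppl_dicts[f"num_{key}"][trial_id] = [... for traj in ground_truth_traj]
  let suppl := ot.items.foldl (fun s tg =>
      nc.keys.foldl (fun s key =>
        s.modify ("num_" ++ key) PySem.Dict.empty
          (fun inner => inner.insert tg.1 (tg.2.map (fun traj => pvACount (nc.getD key []) traj)))) s)
    suppl0
  suppl.items.map (fun p => (p.1, p.2.items))

-- ===== PORT B =====
-- enumerate(xs) (indices are always the nonnegative 0,1,2,…, kept as Nat)
def pvEnum {α : Type} (xs : List α) : List (Nat × α) := (List.range xs.length).zip xs

-- index: node -> list of category positions j whose classification contains the node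
def pvIndex (ncValues : List (List Int)) : PySem.Dict Int (List Nat) :=
  (pvEnum ncValues).foldl (fun idx jn =>
      (PySem.List.dedup jn.2).foldl (fun idx node => idx.modify node [] (· ++ [jn.1])) idx)
    PySem.Dict.empty

-- counts = [0]*n;  for a in dict.fromkeys(actions): for j in index.get(a, []): counts[j] += 1
def pvCounts (index : PySem.Dict Int (List Nat)) (n : Nat) (traj : List (Int × Int × Int)) : List Int :=
  (PySem.List.dedup (traj.map (fun sar => sar.2.1))).foldl
    (fun counts a => (index.getD a []).foldl (fun counts j => counts.set j (counts.getD j 0 + 1)) counts)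
    (List.replicate n 0)

def get_optimal_trajectories_suppl_dicts_alt (optimal_trajectories : List (Int × List (List (Int × Int × Int)))) (node_classification : List (String × List Int)) : List (String × List (Int × List Int)) :=
  let ot := PySem.Dict.ofList optimal_trajectories
  let nc := PySem.Dict.ofList node_classification
  let keys := nc.keys
  let index := pvIndex nc.values
  -- rows: per trial, the per-category lists of counts (transposed assembly)
  let rows := ot.items.foldl (fun rows tg =>
      rows ++ [(tg.1,
        tg.2.foldl (fun pk traj => List.zipWith (fun l c => l ++ [c]) pk (pvCounts index keys.length traj))
          (List.replicate keys.length ([] : List Int)))]) []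
  (pvEnum keys).map (fun jk => ("num_" ++ jk.2, rows.map (fun r => (r.1, r.2.getD jk.1 []))))

-- ===== PRECONDITION & SPEC =====
def Spec_get_optimal_trajectories_suppl_dicts (optimal_trajectories : List (Int × List (List (Int × Int × Int)))) (node_classification : List (String × List Int)) (out : List (String × List (Int × List Int))) : Prop := out = get_optimal_trajectories_suppl_dicts_alt optimal_trajectories node_classification
instance (optimal_trajectories : List (Int × List (List (Int × Int × Int)))) (node_classification : List (String × List Int)) (out : List (String × List (Int × List Int))) : Decidable (Spec_get_optimal_trajectories_suppl_dicts optimal_trajectories node_classification out) := by unfold Spec_get_optimal_trajectories_suppl_dicts; infer_instance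

-- ===== CLAIM (what is proved, stated in full; the proofs are below) =====
def Claim_equal_get_optimal_trajectories_suppl_dicts : Prop := ∀ (optimal_trajectories : List (Int × List (List (Int × Int × Int)))) (node_classification : List (String × List Int)), Dom_get_optimal_trajectories_suppl_dicts optimal_trajectories node_classification → Spec_get_optimal_trajectories_suppl_dicts optimal_trajectories node_classification (get_optimal_trajectories_suppl_dicts optimal_trajectories node_classification)

-- ===== LEMMAS AND PROOFS =====

-- "num_" ++ · is injective
theorem pv_num_inj {a b : String} (h : "num_" ++ a = "num_" ++ b) : a = b :=
  (String.append_right_inj "num_").mp h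

theorem pvEnum_length {α : Type} (xs : List α) : (pvEnum xs).length = xs.length := by
  simp [pvEnum]

theorem pvEnum_cons {α : Type} (x : α) (xs : List α) :
    pvEnum (x :: xs) = (0, x) :: (pvEnum xs).map (fun jn => (jn.1 + 1, jn.2)) := by
  simp [pvEnum, List.range_succ_eq_map, List.zip_map_left]

theorem pvEnum_getElem {α : Type} (xs : List α) (j : Nat) (hj : j < xs.length) :
    (pvEnum xs)[j]'(by simp [pvEnum, hj]) = (j, xs[j]) := by
  simp [pvEnum]

-- the inverted index, as a flat list of category positions
def pvG (ncValues : List (List Int)) (a : Int) : List Nat :=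
  (pvEnum ncValues).flatMap (fun jn => if (PySem.List.dedup jn.2).contains a then [jn.1] else [])

theorem pvG_cons (ns : List Int) (rest : List (List Int)) (a : Int) :
    pvG (ns :: rest) a = (if (PySem.List.dedup ns).contains a then [0] else []) ++ (pvG rest a).map (· + 1) := by
  simp only [pvG, pvEnum_cons, List.flatMap_cons, List.flatMap_map]
  congr 1
  rw [List.map_flatMap]
  apply List.flatMap_congr
  intro x hx
  split <;> simp

theorem pvG_mem_lt {ncValues : List (List Int)} {a : Int} {j : Nat}
    (h : j ∈ pvG ncValues a) : j < ncValues.length := by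
  induction ncValues generalizing j with
  | nil => simp [pvG, pvEnum] at h
  | cons ns rest ih =>
      rw [pvG_cons] at h
      rcases List.mem_append.mp h with h | h
      · split at h <;> simp_all
      · rcases List.mem_map.mp h with ⟨j', hj', he⟩
        have := ih hj'
        subst he; simp; omega

theorem pvG_count (ncValues : List (List Int)) (a : Int) (j : Nat) (hj : j < ncValues.length) :
    (pvG ncValues a).count j = (if (ncValues[j]).contains a then 1 else 0) := by
  induction ncValues generalizing j with
  | nil => simp at hj
  | cons ns rest ih =>
      rw [pvG_cons, List.count_append]
      cases j with
      | zero =>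
          have h2 : ((pvG rest a).map (· + 1)).count 0 = 0 := by
            rw [List.count_eq_zero]
            intro h
            rcases List.mem_map.mp h with ⟨j', _, he⟩
            omega
          have hd : (PySem.List.dedup ns).contains a = ns.contains a := by
            simp [PySem.List.dedup_eq_ofList]
          rw [h2, hd]
          split <;> simp_all
      | succ j' =>
          have h1 : (if (PySem.List.dedup ns).contains a then [0] else []).count (j' + 1) = 0 := by
            split <;> simp
          rw [h1, List.count_map_of_injective _ _ (fun x y h => by simpa using h : Function.Injective (fun x : Nat => x + 1))]
          simpa using ih j' (by simpa using hj)

-- the index dict realises pvG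
theorem pvIndex_getD (ncValues : List (List Int)) (a : Int) :
    (pvIndex ncValues).getD a [] = pvG ncValues a := by
  have h1 : pvIndex ncValues =
      ((pvEnum ncValues).flatMap (fun jn => (PySem.List.dedup jn.2).map (fun node => (node, jn.1)))).foldl
        (fun d p => d.modify p.1 [] (· ++ [p.2])) PySem.Dict.empty := by
    rw [List.foldl_flatMap]
    unfold pvIndex
    apply PySem.List.foldl_congr_mem
    intro acc x hx
    rw [List.foldl_map]
  rw [h1, PySem.Dict.getD_foldl_modify_append]
  rw [show (PySem.Dict.empty : PySem.Dict Int (List Nat)).getD a [] = [] from rfl]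
  rw [List.nil_append, List.filter_flatMap, List.map_flatMap]
  apply List.flatMap_congr
  intro jn hjn
  rw [List.filter_map]
  have hnd : (PySem.List.dedup jn.2).Nodup := by
    rw [PySem.List.dedup_eq_ofList]; exact PySem.Set.nodup_ofList jn.2
  have hc : ((PySem.List.dedup jn.2).filter ((fun p => p.1 == a) ∘ (fun node => (node, jn.1)))) =
      (PySem.List.dedup jn.2).filter (· == a) := rfl
  rw [hc, List.filter_beq, List.map_map]
  by_cases hm : a ∈ PySem.List.dedup jn.2
  · rw [List.count_eq_one_of_mem hnd hm]
    simp
    simpa [PySem.List.dedup_eq_ofList] using hm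
  · rw [List.count_eq_zero_of_not_mem hm]
    simp
    simpa [PySem.List.dedup_eq_ofList] using hm

-- the increment at i seen through getD
theorem pv_getD_set (c : List Int) (i j : Nat) (v : Int) (h : i < c.length) :
    (c.set i v).getD j 0 = if j = i then v else c.getD j 0 := by
  by_cases hij : i = j
  · subst hij; simp [List.getD_eq_getElem?_getD, h]
  · have h' : ¬ j = i := fun h' => hij h'.symm
    simp [List.getD_eq_getElem?_getD, hij, h']

-- the inner scatter loop adds, at each position, the number of occurrences in L
theorem pv_scatter_fold (L : List Nat) (c : List Int) (hL : ∀ x ∈ L, x < c.length) (j : Nat) :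
    ((L.foldl (fun c j => c.set j (c.getD j 0 + 1)) c).getD j 0 = c.getD j 0 + L.count j) ∧
    (L.foldl (fun c j => c.set j (c.getD j 0 + 1)) c).length = c.length := by
  induction L generalizing c with
  | nil => simp
  | cons x t ih =>
      have hx : x < c.length := hL x (by simp)
      have hL' : ∀ y ∈ t, y < (c.set x (c.getD x 0 + 1)).length := by
        intro y hy; rw [List.length_set]; exact hL y (by simp [hy])
      rcases ih (c.set x (c.getD x 0 + 1)) hL' with ⟨ih1, ih2⟩
      constructor
      · rw [List.foldl_cons, ih1, pv_getD_set c x j _ hx, List.count_cons]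
        by_cases hxj : j = x
        · simp [hxj]; ring
        · have : ¬ (x = j) := fun h => hxj h.symm
          simp [hxj, this]
      · rw [List.foldl_cons, ih2, List.length_set]

-- the whole per-trajectory scatter, position by position
theorem pv_counts_aux (ncValues : List (List Int)) (j : Nat) (hj : j < ncValues.length)
    (acts : List Int) (c : List Int) (hc : c.length = ncValues.length) :
    ((acts.foldl (fun counts a => ((pvIndex ncValues).getD a []).foldl
        (fun counts j => counts.set j (counts.getD j 0 + 1)) counts) c).getD j 0 =
      c.getD j 0 + (acts.countP (fun a => (ncValues[j]).contains a) : Int)) ∧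
    (acts.foldl (fun counts a => ((pvIndex ncValues).getD a []).foldl
        (fun counts j => counts.set j (counts.getD j 0 + 1)) counts) c).length = ncValues.length := by
  induction acts generalizing c with
  | nil => simpa using hc
  | cons a t ih =>
      have hL : ∀ x ∈ (pvIndex ncValues).getD a [], x < c.length := by
        intro x hx
        rw [hc]
        exact pvG_mem_lt (by rwa [pvIndex_getD] at hx)
      rcases pv_scatter_fold ((pvIndex ncValues).getD a []) c hL j with ⟨hs1, hs2⟩
      rcases ih (((pvIndex ncValues).getD a []).foldl
          (fun counts j => counts.set j (counts.getD j 0 + 1)) c) (by rw [hs2, hc]) with ⟨ih1, ih2⟩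
      refine ⟨?_, by simpa using ih2⟩
      rw [List.foldl_cons, ih1, hs1, pvIndex_getD, pvG_count ncValues a j hj, List.countP_cons]
      simp only [List.contains_iff_mem]
      push_cast
      split_ifs <;> ring

theorem pvCounts_getD (ncValues : List (List Int)) (traj : List (Int × Int × Int)) (j : Nat)
    (hj : j < ncValues.length) :
    (pvCounts (pvIndex ncValues) ncValues.length traj).getD j 0 =
      ((PySem.List.dedup (traj.map (fun sar => sar.2.1))).countP (fun a => (ncValues[j]).contains a) : Int) := by
  unfold pvCounts
  rw [(pv_counts_aux ncValues j hj _ (List.replicate ncValues.length 0) (by simp)).1]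
  simp [List.getD_eq_getElem?_getD, hj]

theorem pvCounts_length (ncValues : List (List Int)) (traj : List (Int × Int × Int)) :
    (pvCounts (pvIndex ncValues) ncValues.length traj).length = ncValues.length := by
  cases ncValues with
  | nil => simp [pvCounts, pvIndex, pvEnum]
  | cons ns rest =>
      unfold pvCounts
      exact (pv_counts_aux (ns :: rest) 0 (by simp) _ (List.replicate (ns :: rest).length 0) (by simp)).2

-- A's per-cell value equals B's per-cell value
theorem pv_cell_eq (ncValues : List (List Int)) (traj : List (Int × Int × Int)) (j : Nat)
    (hj : j < ncValues.length) :
    (pvCounts (pvIndex ncValues) ncValues.length traj).getD j 0 = pvACount (ncValues[j]) traj := by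
  rw [pvCounts_getD ncValues traj j hj]
  unfold pvACount
  congr 1
  rw [show PySem.Set.inter (PySem.Set.ofList (traj.map (fun sar => sar.2.1))) (ncValues[j]) =
      (PySem.Set.ofList (traj.map (fun sar => sar.2.1))).filter (fun x => (ncValues[j]).contains x) from by
    simp [PySem.Set.inter]]
  rw [PySem.List.dedup_eq_ofList, List.countP_eq_length_filter]

-- the per_key transposition loop
theorem pv_perkey_fold (ncValues : List (List Int))
    (trajs : List (List (Int × Int × Int))) (pk : List (List Int)) (hpk : pk.length = ncValues.length)
    (j : Nat) (hj : j < ncValues.length) :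
    ((trajs.foldl (fun pk traj => List.zipWith (fun l c => l ++ [c]) pk (pvCounts (pvIndex ncValues) ncValues.length traj)) pk).getD j [] =
      pk.getD j [] ++ trajs.map (fun traj => (pvCounts (pvIndex ncValues) ncValues.length traj).getD j 0)) ∧
    (trajs.foldl (fun pk traj => List.zipWith (fun l c => l ++ [c]) pk (pvCounts (pvIndex ncValues) ncValues.length traj)) pk).length = ncValues.length := by
  induction trajs generalizing pk with
  | nil => simpa using hpk
  | cons t ts ih =>
      have hlen : (List.zipWith (fun l c => l ++ [c]) pk (pvCounts (pvIndex ncValues) ncValues.length t)).length = ncValues.length := by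
        rw [List.length_zipWith, hpk, pvCounts_length]
        simp
      rcases ih (List.zipWith (fun l c => l ++ [c]) pk (pvCounts (pvIndex ncValues) ncValues.length t)) hlen with ⟨ih1, ih2⟩
      refine ⟨?_, by simpa using ih2⟩
      rw [List.foldl_cons, ih1]
      have hz : (List.zipWith (fun l c => l ++ [c]) pk (pvCounts (pvIndex ncValues) ncValues.length t)).getD j [] =
          pk.getD j [] ++ [(pvCounts (pvIndex ncValues) ncValues.length t).getD j 0] := by
        have hj1 : j < pk.length := by omega
        have hj2 : j < (pvCounts (pvIndex ncValues) ncValues.length t).length := by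
          rw [pvCounts_length]; exact hj
        rw [List.getD_eq_getElem?_getD, List.getElem?_zipWith]
        simp [hj1, hj2, List.getD_eq_getElem?_getD]
      rw [hz]
      simp

-- keys and values of a dict have the same length
theorem pv_keys_values_length {κ ν : Type} [BEq κ] (d : PySem.Dict κ ν) :
    d.keys.length = d.values.length := by
  simp [PySem.Dict.keys, PySem.Dict.values]

-- looking up the j-th key returns the j-th value
theorem pv_getD_key_getElem (nc : PySem.Dict String (List Int)) (hnd : nc.keys.Nodup)
    (j : Nat) (hj : j < nc.keys.length) :
    nc.getD (nc.keys[j]) [] = nc.values[j]'(by rw [← pv_keys_values_length]; exact hj) := by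
  refine PySem.Dict.getD_of_mem_items _ ?_ hnd _
  have h1 : nc.items[j]'(by simpa [PySem.Dict.keys] using hj) = (nc.keys[j], nc.values[j]'(by rw [← pv_keys_values_length]; exact hj)) := by
    simp [PySem.Dict.keys, PySem.Dict.values]
  rw [← h1]
  exact List.getElem_mem _

-- Set.update by already-present elements is the identity
theorem pv_set_update_id {α : Type} [BEq α] [LawfulBEq α] (s : PySem.Set α) (xs : List α)
    (h : ∀ x ∈ xs, x ∈ s) : PySem.Set.update s xs = s := by
  induction xs generalizing s with
  | nil => rfl
  | cons x t ih =>
      simp only [PySem.Set.update, List.foldl_cons] at *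
      rw [show PySem.Set.add s x = s from by simp [PySem.Set.add, PySem.Set.contains, h x (by simp)]]
      exact ih s (fun y hy => h y (by simp [hy]))

-- A's inner pass over the keys, seen through getD at one key
theorem pvA_inner_pass (ks : List String) (k : String)
    (F : String → PySem.Dict Int (List Int) → PySem.Dict Int (List Int)) :
    ∀ (s : PySem.Dict String (PySem.Dict Int (List Int))), ks.Nodup →
    (ks.foldl (fun s key => s.modify ("num_" ++ key) PySem.Dict.empty (F key)) s).getD ("num_" ++ k) PySem.Dict.empty =
      if k ∈ ks then F k (s.getD ("num_" ++ k) PySem.Dict.empty)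
      else s.getD ("num_" ++ k) PySem.Dict.empty := by
  induction ks with
  | nil => intro s _; simp
  | cons x t ih =>
      intro s hnd
      rcases List.nodup_cons.mp hnd with ⟨hx, hnd'⟩
      rw [List.foldl_cons, ih _ hnd']
      by_cases hkx : k = x
      · subst hkx
        have hkt : k ∉ t := hx
        simp [hkt, PySem.Dict.getD_modify_self]
      · have hne : ("num_" ++ k) ≠ ("num_" ++ x) := fun h => hkx (pv_num_inj h)
        rw [PySem.Dict.getD_modify]
        simp only [if_neg hne]
        by_cases hkt : k ∈ t
        · simp [hkt, List.mem_cons, hkx]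
        · simp [hkt, List.mem_cons, hkx]

-- A's outer pass over the trials, seen through getD at one key
theorem pvA_outer_pass (ks : List String) (hnd : ks.Nodup) (k : String) (hk : k ∈ ks)
    (g : String → (Int × List (List (Int × Int × Int))) → PySem.Dict Int (List Int) → PySem.Dict Int (List Int))
    (ts : List (Int × List (List (Int × Int × Int))))
    (s : PySem.Dict String (PySem.Dict Int (List Int))) :
    (ts.foldl (fun s tg => ks.foldl (fun s key => s.modify ("num_" ++ key) PySem.Dict.empty (g key tg)) s) s).getD ("num_" ++ k) PySem.Dict.empty =
      ts.foldl (fun inner tg => g k tg inner) (s.getD ("num_" ++ k) PySem.Dict.empty) := by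
  induction ts generalizing s with
  | nil => simp
  | cons tg ts ih =>
      rw [List.foldl_cons, ih, List.foldl_cons, pvA_inner_pass ks k _ _ hnd, if_pos hk]

-- A's keys are never changed by the modify loops
theorem pvA_keys_pass (ks : List String)
    (g : String → (Int × List (List (Int × Int × Int))) → PySem.Dict Int (List Int) → PySem.Dict Int (List Int))
    (ts : List (Int × List (List (Int × Int × Int))))
    (s : PySem.Dict String (PySem.Dict Int (List Int)))
    (hsub : ∀ x ∈ ks, ("num_" ++ x) ∈ s.keys) :
    (ts.foldl (fun s tg => ks.foldl (fun s key => s.modify ("num_" ++ key) PySem.Dict.empty (g key tg)) s) s).keys = s.keys := by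
  induction ts generalizing s with
  | nil => rfl
  | cons tg ts ih =>
      rw [List.foldl_cons]
      have hstep : (ks.foldl (fun s key => s.modify ("num_" ++ key) PySem.Dict.empty (g key tg)) s).keys = s.keys := by
        rw [PySem.Dict.keys_foldl_modify_key ks (fun x => "num_" ++ x) PySem.Dict.empty (fun _ key => g key tg)]
        apply pv_set_update_id
        intro y hy
        rcases List.mem_map.mp hy with ⟨x, hx, he⟩
        subst he
        exact hsub x hx
      rw [ih _ (by rw [hstep]; exact hsub), hstep]

-- A's nested dict-mutation loops, flattened to a closed form
theorem pvA_closed (optimal_trajectories : List (Int × List (List (Int × Int × Int)))) (node_classification : List (String × List Int)) :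
    get_optimal_trajectories_suppl_dicts optimal_trajectories node_classification =
      (PySem.Dict.ofList node_classification).keys.map (fun k =>
        ("num_" ++ k, (PySem.Dict.ofList optimal_trajectories).items.map (fun tg =>
          (tg.1, tg.2.map (fun traj => pvACount ((PySem.Dict.ofList node_classification).getD k []) traj))))) := by
  simp only [get_optimal_trajectories_suppl_dicts]
  set nc := PySem.Dict.ofList node_classification with hnc
  set ot := PySem.Dict.ofList optimal_trajectories with hot
  have hknd : nc.keys.Nodup := PySem.Dict.nodup_keys_ofList _
  have hmapnd : (nc.keys.map (fun k => "num_" ++ k)).Nodup :=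
    List.Nodup.map (fun a b h => pv_num_inj h) hknd
  -- the initial comprehension
  have h0 : (nc.keys.foldl (fun d k => d.insert ("num_" ++ k) (PySem.Dict.empty : PySem.Dict Int (List Int))) PySem.Dict.empty).items
      = nc.keys.map (fun k => ("num_" ++ k, PySem.Dict.empty)) := by
    rw [PySem.Dict.items_foldl_insert_fresh nc.keys (fun k => "num_" ++ k) (fun _ => PySem.Dict.empty) PySem.Dict.empty
      (fun a _ => PySem.Dict.contains_empty _) hmapnd]
    rfl
  set suppl0 := nc.keys.foldl (fun d k => d.insert ("num_" ++ k) (PySem.Dict.empty : PySem.Dict Int (List Int))) PySem.Dict.empty with hs0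
  have h0keys : suppl0.keys = nc.keys.map (fun k => "num_" ++ k) := by
    simp [PySem.Dict.keys, h0]
  have h0getD : ∀ k ∈ nc.keys, suppl0.getD ("num_" ++ k) PySem.Dict.empty = PySem.Dict.empty := by
    intro k hk
    apply PySem.Dict.getD_of_mem_items _ _ (by rw [h0keys]; exact hmapnd)
    rw [h0]
    exact List.mem_map.mpr ⟨k, hk, rfl⟩
  set final := ot.items.foldl (fun s tg =>
      nc.keys.foldl (fun s key =>
        s.modify ("num_" ++ key) PySem.Dict.empty
          (fun inner => inner.insert tg.1 (tg.2.map (fun traj => pvACount (nc.getD key []) traj)))) s)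
    suppl0 with hfin
  have hfkeys : final.keys = nc.keys.map (fun k => "num_" ++ k) := by
    rw [hfin, pvA_keys_pass nc.keys
      (fun key tg inner => inner.insert tg.1 (tg.2.map (fun traj => pvACount (nc.getD key []) traj)))
      ot.items suppl0 (by intro x hx; rw [h0keys]; exact List.mem_map.mpr ⟨x, hx, rfl⟩), h0keys]
  have hitems : final.items = final.keys.map (fun K => (K, final.getD K PySem.Dict.empty)) :=
    PySem.Dict.items_eq_map_keys final (by rw [hfkeys]; exact hmapnd) PySem.Dict.empty
  rw [hitems, hfkeys, List.map_map, List.map_map]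
  apply List.map_congr_left
  intro k hk
  simp only [Function.comp]
  congr 1
  rw [hfin, pvA_outer_pass nc.keys hknd k hk
      (fun key tg inner => inner.insert tg.1 (tg.2.map (fun traj => pvACount (nc.getD key []) traj)))
      ot.items suppl0, h0getD k hk]
  have hotnd : (ot.items.map (fun tg => tg.1)).Nodup := by
    have h : ot.items.map (fun tg => tg.1) = ot.keys := by simp [PySem.Dict.keys]
    rw [h]; exact PySem.Dict.nodup_keys_ofList _
  have hfresh := PySem.Dict.items_foldl_insert_fresh ot.items (fun tg => tg.1)
    (fun tg => tg.2.map (fun traj => pvACount (nc.getD k []) traj)) PySem.Dict.empty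
    (fun a _ => PySem.Dict.contains_empty _) hotnd
  simpa using hfresh

-- B, flattened to the same closed form
theorem pvB_closed (optimal_trajectories : List (Int × List (List (Int × Int × Int)))) (node_classification : List (String × List Int)) :
    get_optimal_trajectories_suppl_dicts_alt optimal_trajectories node_classification =
      (PySem.Dict.ofList node_classification).keys.map (fun k =>
        ("num_" ++ k, (PySem.Dict.ofList optimal_trajectories).items.map (fun tg =>
          (tg.1, tg.2.map (fun traj => pvACount ((PySem.Dict.ofList node_classification).getD k []) traj))))) := by
  simp only [get_optimal_trajectories_suppl_dicts_alt]
  rw [PySem.List.foldl_append_singleton_eq_map, List.nil_append]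
  set nc := PySem.Dict.ofList node_classification with hnc
  set ot := PySem.Dict.ofList optimal_trajectories with hot
  have hvk : nc.values.length = nc.keys.length := (pv_keys_values_length nc).symm
  apply List.ext_getElem
  · simp [pvEnum_length]
  · intro j h1 h2
    have hj : j < nc.keys.length := by simpa [pvEnum_length] using h1
    simp only [List.getElem_map]
    rw [pvEnum_getElem nc.keys j hj]
    have hjv : j < nc.values.length := by omega
    have hknd : nc.keys.Nodup := PySem.Dict.nodup_keys_ofList _
    congr 1
    rw [List.map_map]
    apply List.map_congr_left
    intro tg htg
    simp only [Function.comp]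
    congr 1
    have hkl : nc.keys.length = nc.values.length := hvk.symm
    simp only [hkl]
    rw [(pv_perkey_fold nc.values tg.2 (List.replicate nc.values.length []) (by simp) j hjv).1]
    have hrep : (List.replicate nc.values.length ([] : List Int)).getD j [] = [] := by
      rcases Nat.lt_or_ge j nc.values.length with h | h <;>
        simp [List.getD_eq_getElem?_getD, h]
    rw [hrep, List.nil_append]
    apply List.map_congr_left
    intro traj _
    rw [pv_cell_eq nc.values traj j hjv,
      pv_getD_key_getElem nc hknd j (by omega)]


-- ===== VERDICT (by name: the statement is the Claim_ definition above) =====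
theorem get_optimal_trajectories_suppl_dicts_spec : Claim_equal_get_optimal_trajectories_suppl_dicts := by
  intro ot nc _
  unfold Spec_get_optimal_trajectories_suppl_dicts
  rw [pvA_closed, pvB_closed]
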